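-- pv_equiv track=rewrite | github.com/CheickDiakite-yikes/gemma-local-expert | engine/models/sources.py | _iter_candidate_refs
-- ===== SOURCE A (Python) =====
-- MODEL_SOURCE_ALIASES: dict[str, list[str]] = {
--     "embeddinggemma-300m": ["google/embeddinggemma-300m"],
--     "gemma-4-e4b-it": ["google/gemma-4-E4B-it"],
--     "gemma-4-e2b-it-4bit": ["mlx-community/gemma-4-e2b-it-4bit"],
--     "paligemma-2": ["mlx-community/paligemma2-3b-mix-224-4bit"],
--     "paligemma2-3b-mix-224-4bit": ["mlx-community/paligemma2-3b-mix-224-4bit"],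
--     "sam3.1": ["mlx-community/sam3.1-bf16"],
--     "sam3.1-bf16": ["mlx-community/sam3.1-bf16"],
--     "medgemma-1.5-4b": ["mlx-community/medgemma-1.5-4b-it-4bit"],
--     "medgemma-1.5-4b-it-4bit": ["mlx-community/medgemma-1.5-4b-it-4bit"],
-- }
--
-- def _iter_candidate_refs(source: str | None, model_name: str | None) -> list[str]:
--     refs: list[str] = []
--     seen: set[str] = set()
--
--     def add(ref: str | None) -> None:
--         if not ref:
--             return
--         if ref in seen:
--             return
--         seen.add(ref)
--         refs.append(ref)
--
--     for ref in (source, model_name):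
--         add(ref)
--         for alias in MODEL_SOURCE_ALIASES.get((ref or "").strip().lower(), []):
--             add(alias)
--
--     return refs
-- ===== SOURCE B (Python) =====
-- MODEL_SOURCE_ALIASES: dict[str, list[str]] = {
--     "embeddinggemma-300m": ["google/embeddinggemma-300m"],
--     "gemma-4-e4b-it": ["google/gemma-4-E4B-it"],
--     "gemma-4-e2b-it-4bit": ["mlx-community/gemma-4-e2b-it-4bit"],
--     "paligemma-2": ["mlx-community/paligemma2-3b-mix-224-4bit"],
--     "paligemma2-3b-mix-224-4bit": ["mlx-community/paligemma2-3b-mix-224-4bit"],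
--     "sam3.1": ["mlx-community/sam3.1-bf16"],
--     "sam3.1-bf16": ["mlx-community/sam3.1-bf16"],
--     "medgemma-1.5-4b": ["mlx-community/medgemma-1.5-4b-it-4bit"],
--     "medgemma-1.5-4b-it-4bit": ["mlx-community/medgemma-1.5-4b-it-4bit"],
-- }
--
--
-- def _iter_candidate_refs(source: str | None, model_name: str | None) -> list[str]:
--     # Recursive head-and-prune dedup: take the first truthy candidate, delete all
--     # its later occurrences from the remainder, recurse.  No 'seen' state at all.
--     def expand(ref: str | None) -> list[str | None]:
--         return [ref] + MODEL_SOURCE_ALIASES.get((ref or "").strip().lower(), [])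
--
--     def dedup(cands: list[str | None]) -> list[str]:
--         if not cands:
--             return []
--         head, rest = cands[0], cands[1:]
--         if not head:
--             return dedup(rest)
--         return [head] + dedup([c for c in rest if c != head])
--
--     return dedup(expand(source) + expand(model_name))
-- ===== Notes on version B (the rewrite author's own statement) =====
-- stated objective: alternative
-- what changed: Replaces A's fused loop that threads a 'seen' set through a nested add() closure with a flatten step plus a recursive head-and-prune dedup: take the first truthy candidate, delete all its later occurrences from the remainder, recurse — no seen-set state at all.
import Mathlib
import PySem

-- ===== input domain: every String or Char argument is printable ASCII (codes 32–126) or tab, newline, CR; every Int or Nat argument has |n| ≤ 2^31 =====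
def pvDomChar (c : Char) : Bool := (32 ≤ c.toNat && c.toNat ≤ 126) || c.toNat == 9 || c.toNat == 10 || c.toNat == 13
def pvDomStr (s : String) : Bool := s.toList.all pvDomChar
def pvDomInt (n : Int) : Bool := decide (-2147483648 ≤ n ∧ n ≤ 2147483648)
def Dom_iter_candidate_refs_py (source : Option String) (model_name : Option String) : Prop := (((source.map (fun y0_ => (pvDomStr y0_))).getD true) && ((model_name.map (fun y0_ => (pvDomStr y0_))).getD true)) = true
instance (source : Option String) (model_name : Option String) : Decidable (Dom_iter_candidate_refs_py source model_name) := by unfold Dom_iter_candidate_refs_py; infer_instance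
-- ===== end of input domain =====

-- B replaces A's fused loop threading a 'seen' set through a nested add() closure by a
-- recursive head-and-prune dedup (take first truthy candidate, delete its later
-- occurrences, recurse) over the flattened candidate list; alternative decomposition, same result.

def pvAliases : PySem.Dict String (List String) := PySem.Dict.ofList
  [ ("embeddinggemma-300m", ["google/embeddinggemma-300m"]),
    ("gemma-4-e4b-it", ["google/gemma-4-E4B-it"]),
    ("gemma-4-e2b-it-4bit", ["mlx-community/gemma-4-e2b-it-4bit"]),
    ("paligemma-2", ["mlx-community/paligemma2-3b-mix-224-4bit"]),
    ("paligemma2-3b-mix-224-4bit", ["mlx-community/paligemma2-3b-mix-224-4bit"]),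
    ("sam3.1", ["mlx-community/sam3.1-bf16"]),
    ("sam3.1-bf16", ["mlx-community/sam3.1-bf16"]),
    ("medgemma-1.5-4b", ["mlx-community/medgemma-1.5-4b-it-4bit"]),
    ("medgemma-1.5-4b-it-4bit", ["mlx-community/medgemma-1.5-4b-it-4bit"]) ]

-- ===== PORT A =====
-- the nested closure 'add': threads (refs, seen); 'not ref' is none-or-empty
def pvAdd (st : List String × PySem.Set String) (ref : Option String) :
    List String × PySem.Set String :=
  match ref with
  | none => st
  | some r =>
    if r = "" then st
    else if PySem.Set.contains st.2 r then st
    else (st.1 ++ [r], PySem.Set.add st.2 r)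

def iter_candidate_refs_py (source : Option String) (model_name : Option String) : List String :=
  let st :=
    [source, model_name].foldl
      (fun st ref =>
        let st := pvAdd st ref
        (PySem.Dict.getD pvAliases (PySem.Str.lower (PySem.Str.strip (ref.getD ""))) []).foldl
          (fun st a => pvAdd st (some a)) st)
      ([], PySem.Set.empty)
  st.1

-- ===== PORT B =====
-- expand(ref) = [ref] + aliases
def pvExpand (ref : Option String) : List (Option String) :=
  ref :: (PySem.Dict.getD pvAliases (PySem.Str.lower (PySem.Str.strip (ref.getD ""))) []).map some

-- recursive head-and-prune dedup, as in Source B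
def pvDedup : List (Option String) → List String
  | [] => []
  | none :: rest => pvDedup rest
  | some h :: rest =>
    if h = "" then pvDedup rest
    else h :: pvDedup (rest.filter (fun c => c ≠ some h))
termination_by l => l.length
decreasing_by
  · simp
  · simp
  · simpa using Nat.lt_succ_of_le ((List.length_filter_le _ _).trans (by simp))

def iter_candidate_refs_py_alt (source : Option String) (model_name : Option String) : List String :=
  pvDedup (pvExpand source ++ pvExpand model_name)

-- ===== PRECONDITION & SPEC =====
def Spec_iter_candidate_refs_py (source : Option String) (model_name : Option String) (out : List String) : Prop := out = iter_candidate_refs_py_alt source model_name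
instance (source : Option String) (model_name : Option String) (out : List String) : Decidable (Spec_iter_candidate_refs_py source model_name out) := by unfold Spec_iter_candidate_refs_py; infer_instance

-- ===== CLAIM (what is proved, stated in full; the proofs are below) =====
def Claim_equal_iter_candidate_refs_py : Prop := ∀ (source : Option String) (model_name : Option String), Dom_iter_candidate_refs_py source model_name → Spec_iter_candidate_refs_py source model_name (iter_candidate_refs_py source model_name)

-- ===== LEMMAS AND PROOFS =====

-- one-argument version of A's add: operating on the single list s (refs = seen as a list)
def pvStep1 (s : List String) (ref : Option String) : List String :=
  match ref with
  | none => s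
  | some r => if r = "" then s else PySem.Set.add s r

theorem pvAdd_pair (s : List String) (ref : Option String) :
    pvAdd (s, s) ref = (pvStep1 s ref, pvStep1 s ref) := by
  cases ref with
  | none => rfl
  | some r =>
    simp only [pvAdd, pvStep1, PySem.Set.add, PySem.Set.contains]
    split_ifs <;> simp_all

theorem pvInner_fold (l : List String) (s : List String) :
    l.foldl (fun st a => pvAdd st (some a)) (s, s)
      = ((l.map some).foldl pvStep1 s, (l.map some).foldl pvStep1 s) := by
  induction l generalizing s with
  | nil => rfl
  | cons a t ih => simp only [List.foldl_cons, List.map_cons, pvAdd_pair, ih]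

-- the key lemma: A's seen-set fold over candidates = already-seen prefix ++ head-and-prune dedup
-- of the candidates not already seen
theorem pvFold_eq_dedup (cs : List (Option String)) (s : List String) :
    cs.foldl pvStep1 s = s ++ pvDedup (cs.filter (fun c => !((s.map some).contains c))) := by
  induction cs generalizing s with
  | nil => simp [pvDedup]
  | cons c rest ih =>
    cases c with
    | none =>
      have hnone : ((s.map some).contains (none : Option String)) = false := by
        simp
      simp only [List.foldl_cons, List.filter_cons, hnone]
      simpa [pvStep1, pvDedup] using ih s
    | some r =>
      by_cases hr : r = ""
      · subst hr
        by_cases hm : "" ∈ s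
        · have : ((s.map some).contains (some "")) = true := by simpa using hm
          simp only [List.foldl_cons, List.filter_cons, this]
          simpa [pvStep1] using ih s
        · have : ((s.map some).contains (some "")) = false := by simpa using hm
          simp only [List.foldl_cons, List.filter_cons, this]
          simpa [pvStep1, pvDedup] using ih s
      · by_cases hm : r ∈ s
        · have : ((s.map some).contains (some r)) = true := by simpa using hm
          simp only [List.foldl_cons, List.filter_cons, this]
          have hstep : pvStep1 s (some r) = s := by
            simp [pvStep1, hr, PySem.Set.add_of_mem hm]
          rw [hstep]; simpa using ih s
        · have hc : ((s.map some).contains (some r)) = false := by simpa using hm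
          simp only [List.foldl_cons, List.filter_cons, hc, Bool.not_false, if_true]
          have hstep : pvStep1 s (some r) = s ++ [r] := by
            simp [pvStep1, hr, PySem.Set.add_of_not_mem hm]
          rw [hstep, ih (s ++ [r])]
          have hped : pvDedup (some r ::
              rest.filter (fun c => !((s.map some).contains c)))
              = r :: pvDedup ((rest.filter (fun c => !((s.map some).contains c))).filter
                  (fun c => c ≠ some r)) := by
            simp [pvDedup, hr]
          rw [hped, List.filter_filter]
          have hpred : ∀ c : Option String,
              ((!(((s ++ [r]).map some).contains c)) : Bool)
                = ((c ≠ some r : Bool) && !((s.map some).contains c)) := by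
            intro c; cases c <;> simp [Bool.and_comm]
          simp only [List.filter_congr (fun c _ => hpred c)]
          simp

theorem iter_candidate_refs_py_spec : Claim_equal_iter_candidate_refs_py := by
  intro source model_name _
  show _ = _
  simp only [iter_candidate_refs_py, iter_candidate_refs_py_alt, List.foldl_cons,
    List.foldl_nil]
  have h0 : pvAdd (([] : List String), PySem.Set.empty) source
      = (pvStep1 [] source, pvStep1 [] source) := pvAdd_pair [] source
  rw [h0, pvInner_fold, pvAdd_pair, pvInner_fold]
  have hs : ∀ (r : Option String) (l : List (Option String)) (s : List String),
      (l.foldl pvStep1 (pvStep1 s r)) = ((r :: l).foldl pvStep1 s) := by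
    intro r l s; rfl
  rw [hs, hs]
  have := pvFold_eq_dedup
    ((source :: (PySem.Dict.getD pvAliases (PySem.Str.lower (PySem.Str.strip (source.getD ""))) []).map some)
      ++ (model_name :: (PySem.Dict.getD pvAliases (PySem.Str.lower (PySem.Str.strip (model_name.getD ""))) []).map some)) []
  simp only [List.map_nil, List.contains_nil, Bool.not_false, List.filter_true,
    List.nil_append, List.foldl_append] at this
  rw [this]
  rfl
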